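-- pv_equiv track=rewrite | github.com/zouharvi/ptakopet | meta/study/log_processing/meta.py | confirmSplit
-- ===== SOURCE A (Python) =====
-- def confirmSplit(logs):
--     segments = []
--     curSegment = []
--     for log in logs:
--         curSegment.append(log)
--         if log[0] == 'CONFIRM':
--             segments.append(curSegment)
--             curSegment = []
--     return segments
-- ===== SOURCE B (Python) =====
-- def _findConfirm(logs):
--     for i, log in enumerate(logs):
--         if log[0] == 'CONFIRM':
--             return i
--     return None
--
-- def confirmSplit(logs):
--     i = _findConfirm(logs)
--     if i is None:
--         return []
--     return [logs[:i + 1]] + confirmSplit(logs[i + 1:])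
-- ===== Notes on version B (the rewrite author's own statement) =====
-- stated objective: alternative
-- what changed: B is a recursive staged decomposition: it finds the index of the first CONFIRM, emits the prefix up to it as one segment and recurses on the remainder, instead of A's single fold that accumulates a current-segment list element by element.
import Mathlib
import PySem

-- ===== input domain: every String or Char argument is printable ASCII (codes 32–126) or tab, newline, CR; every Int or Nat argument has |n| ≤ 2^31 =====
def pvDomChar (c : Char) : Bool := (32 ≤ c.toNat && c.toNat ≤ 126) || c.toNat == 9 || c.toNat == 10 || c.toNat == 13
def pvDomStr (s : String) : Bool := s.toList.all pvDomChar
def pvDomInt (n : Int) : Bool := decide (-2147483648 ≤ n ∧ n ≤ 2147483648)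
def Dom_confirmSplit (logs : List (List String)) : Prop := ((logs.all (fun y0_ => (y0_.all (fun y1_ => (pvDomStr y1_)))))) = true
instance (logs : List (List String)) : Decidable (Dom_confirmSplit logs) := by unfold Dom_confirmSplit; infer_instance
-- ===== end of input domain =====

-- B recursively splits at the first CONFIRM index (slice, emit, recurse) instead of A's single fold with a running current-segment list; alternative decomposition, same cost.
-- Pre_ excludes logs containing an empty entry, on which A's log[0] raises IndexError (and B's does too).


-- ===== PORT A =====
-- A: accumulate curSegment element by element; flush it into segments at each CONFIRM.
-- log[0] is ported as pyGet? (none = IndexError, excluded by Pre_).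
def confirmSplit (logs : List (List String)) : List (List (List String)) :=
  (logs.foldl
    (fun (st : List (List (List String)) × List (List String)) log =>
      let cur := st.2 ++ [log]
      if PySem.List.pyGet? log 0 == some "CONFIRM" then (st.1 ++ [cur], [])
      else (st.1, cur))
    ([], [])).1

-- ===== PORT B =====
-- B's helper _findConfirm: index of the first entry whose [0] is 'CONFIRM', none otherwise.
def findConfirm? : List (List String) → Option Nat
  | [] => none
  | l :: rest =>
    if PySem.List.pyGet? l 0 == some "CONFIRM" then some 0
    else (findConfirm? rest).map (· + 1)

-- Needed by the port's termination proof.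
theorem findConfirm?_lt {logs : List (List String)} {i : Nat}
    (h : findConfirm? logs = some i) : i < logs.length := by
  induction logs generalizing i with
  | nil => simp [findConfirm?] at h
  | cons l rest ih =>
    unfold findConfirm? at h
    split at h
    · simp_all
      omega
    · cases hr : findConfirm? rest with
      | none => simp [hr] at h
      | some j =>
        simp only [hr, Option.map_some, Option.some.injEq] at h
        subst h
        simpa using Nat.succ_lt_succ (ih hr)

-- B: find the first CONFIRM; emit the prefix slice as a segment and recurse on the rest.
-- The nonnegative slices logs[:i+1] and logs[i+1:] are List.take/List.drop.
def confirmSplit_alt (logs : List (List String)) : List (List (List String)) :=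
  match h : findConfirm? logs with
  | none => []
  | some i => logs.take (i + 1) :: confirmSplit_alt (logs.drop (i + 1))
termination_by logs.length
decreasing_by
  have := findConfirm?_lt h
  simp [List.length_drop]
  omega

-- ===== PRECONDITION & SPEC =====
-- Pre_ excludes logs containing an empty entry: there log[0] raises IndexError in both A and B.
def Pre_confirmSplit (logs : List (List String)) : Prop := ∀ l ∈ logs, l ≠ []
instance (logs : List (List String)) : Decidable (Pre_confirmSplit logs) := by unfold Pre_confirmSplit; infer_instance
def pvWitness_confirmSplit : List (List String) := [["hello", "x"], ["CONFIRM"], ["bye"]]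
def Spec_confirmSplit (logs : List (List String)) (out : List (List (List String))) : Prop := out = confirmSplit_alt logs
instance (logs : List (List String)) (out : List (List (List String))) : Decidable (Spec_confirmSplit logs out) := by unfold Spec_confirmSplit; infer_instance

-- ===== CLAIM (what is proved, stated in full; the proofs are below) =====
def Claim_equal_confirmSplit : Prop := ∀ (logs : List (List String)), Dom_confirmSplit logs → Pre_confirmSplit logs → Spec_confirmSplit logs (confirmSplit logs)

-- ===== LEMMAS AND PROOFS =====

-- Reference recursion: A's loop body as structural recursion carrying the current segment.
def csRec : List (List String) → List (List String) → List (List (List String))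
  | [], _ => []
  | l :: rest, cur =>
    if PySem.List.pyGet? l 0 == some "CONFIRM" then (cur ++ [l]) :: csRec rest []
    else csRec rest (cur ++ [l])

-- A's loop body, named so the induction below is syntactically stable.
def stepA (st : List (List (List String)) × List (List String)) (log : List String) :
    List (List (List String)) × List (List String) :=
  let cur := st.2 ++ [log]
  if PySem.List.pyGet? log 0 == some "CONFIRM" then (st.1 ++ [cur], []) else (st.1, cur)

-- A's fold equals segs ++ csRec.
theorem foldA_eq_csRec (logs : List (List String)) :
    ∀ (segs : List (List (List String))) (cur : List (List String)),
      (logs.foldl stepA (segs, cur)).1 = segs ++ csRec logs cur := by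
  induction logs with
  | nil => intro segs cur; simp [csRec]
  | cons l rest ih =>
    intro segs cur
    rw [List.foldl_cons]
    by_cases hc : (PySem.List.pyGet? l 0 == some "CONFIRM") = true
    · rw [show stepA (segs, cur) l = (segs ++ [cur ++ [l]], []) from by simp [stepA, hc]]
      rw [ih]
      simp [csRec, hc]
    · rw [show stepA (segs, cur) l = (segs, cur ++ [l]) from by simp [stepA, hc]]
      rw [ih]
      simp [csRec, hc]

-- csRec unfolds along the first CONFIRM index.
theorem csRec_findConfirm (logs : List (List String)) :
    ∀ (cur : List (List String)),
      csRec logs cur =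
        match findConfirm? logs with
        | none => []
        | some i => (cur ++ logs.take (i + 1)) :: csRec (logs.drop (i + 1)) [] := by
  induction logs with
  | nil => intro cur; simp [csRec, findConfirm?]
  | cons l rest ih =>
    intro cur
    by_cases hc : PySem.List.pyGet? l 0 == some "CONFIRM"
    · simp [csRec, findConfirm?, hc]
    · simp only [csRec, findConfirm?, hc, if_false, Bool.false_eq_true]
      rw [ih (cur ++ [l])]
      cases hr : findConfirm? rest with
      | none => simp
      | some j => simp [List.append_assoc]

-- B equals csRec with empty current segment.
theorem alt_eq_csRec (logs : List (List String)) : confirmSplit_alt logs = csRec logs [] := by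
  induction hn : logs.length using Nat.strong_induction_on generalizing logs with
  | _ n ih =>
    subst hn
    rw [confirmSplit_alt.eq_def, csRec_findConfirm]
    split
    · next h => simp [h]
    · next i h =>
      have hlt := findConfirm?_lt h
      have hlen : (List.drop (i + 1) logs).length < logs.length := by
        simp [List.length_drop]; omega
      rw [h, ih _ hlen _ rfl]
      simp

-- ===== VERDICT (by name: the statement is the Claim_ definition above) =====
theorem confirmSplit_spec : Claim_equal_confirmSplit := by
  intro logs _ _
  unfold Spec_confirmSplit
  have hA : confirmSplit logs = (logs.foldl stepA ([], [])).1 := rfl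
  rw [hA, foldA_eq_csRec, alt_eq_csRec]
  simp
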